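-- pv_equiv track=rewrite | github.com/manas-17045/LeetcodeSolutions | Leetcode 2501-2600/2522/2522-2.py | minimumPartition
-- ===== SOURCE A (Python) =====
-- def minimumPartition(s: str, k: int) -> int:
--     """
--     Partitions a string `s` into the minimum number of substrings such that each substring's integer value is less than or equal to `k`.
--
--     :param s: The input string consisting of digits.
--     :param k: The maximum allowed integer value for each substring.
--     :return: The minimum number of partitions, or -1 if it's impossible to partition.
--     """
--     # If any single digit is greater tha k, impossible
--     if any(int(ch) > k for ch in s):
--         return -1
--
--     count = 1
--     curr = int(s[0])
--
--     for ch in s[1:]: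
--         d = int(ch)
--         # Try to append digit to current number
--         if curr * 10 + d <= k:
--             curr = curr * 10 + d
--         else:
--             # Start a new substring with this digit
--             count += 1
--             curr = d
--
--     return count
-- ===== SOURCE B (Python) =====
-- def minimumPartition(s: str, k: int) -> int:
--     # Scan left to right; each partition is extended maximally by re-parsing
--     # the substring s[i:j+1] with int(); impossibility surfaces at a chunk start.
--     count, i, n = 0, 0, len(s)
--     while i < n:
--         if int(s[i]) > k:
--             return -1
--         j = i + 1
--         while j < n and int(s[i:j + 1]) <= k:
--             j += 1
--         count += 1
--         i = j
--     return count
-- ===== Notes on version B (the rewrite author's own statement) =====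
-- stated objective: alternative
-- what changed: Replaces A's upfront any() feasibility scan plus incremental accumulator fold (curr = curr*10+d) by a single index scan that extends each partition maximally by re-parsing the substring with int(s[i:j+1]) and detects impossibility at partition starts.
import Mathlib
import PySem

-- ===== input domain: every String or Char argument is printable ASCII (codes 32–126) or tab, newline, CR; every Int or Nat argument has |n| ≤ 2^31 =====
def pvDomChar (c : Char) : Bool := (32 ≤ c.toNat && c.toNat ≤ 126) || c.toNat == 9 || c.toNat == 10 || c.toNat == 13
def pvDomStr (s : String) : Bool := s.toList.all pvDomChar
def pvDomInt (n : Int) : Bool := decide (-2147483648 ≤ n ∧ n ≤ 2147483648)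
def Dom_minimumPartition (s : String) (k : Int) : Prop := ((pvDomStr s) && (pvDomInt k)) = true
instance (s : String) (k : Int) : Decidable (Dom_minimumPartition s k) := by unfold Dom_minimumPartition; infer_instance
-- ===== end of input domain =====

-- B replaces A's any()-scan + accumulator fold by a maximal-munch index scan that
-- re-parses each candidate substring; same values on all nonempty digit strings (alternative, not faster).

-- ===== PORT A =====
-- int(ch) for a single digit character (exact on '0'..'9', the Pre_ domain)
def pvDigit (c : Char) : Int := (c.toNat : Int) - 48

-- one step of A's for-loop: state (count, curr)
def pvStep (k : Int) (st : Int × Int) (c : Char) : Int × Int :=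
  if st.2 * 10 + pvDigit c ≤ k then (st.1, st.2 * 10 + pvDigit c)
  else (st.1 + 1, pvDigit c)

def minimumPartition (s : String) (k : Int) : Int :=
  let cs := s.toList
  if cs.any (fun c => k < pvDigit c) then -1
  else
    match cs with
    | [] => 0  -- Python raises IndexError on s[0] here; excluded by Pre_
    | c :: rest => (rest.foldl (pvStep k) (1, pvDigit c)).1

-- ===== PORT B =====
-- int(s[i:j]) for a digit substring (exact on nonempty all-digit strings, the Pre_ domain)
def pvStrVal (cs : List Char) : Int :=
  cs.foldl (fun a c => a * 10 + pvDigit c) 0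

-- inner while loop: extend j while j < n and int(s[i:j+1]) <= k
-- (the slice s[i:j+1] is ported as (cs.drop i).take (j+1-i), exact for the in-range
--  bounds 0 ≤ i ≤ j+1 the loop uses)
def pvInner (k : Int) (cs : List Char) (i : Nat) (j : Nat) : Nat :=
  if h : j < cs.length ∧ pvStrVal ((cs.drop i).take (j + 1 - i)) ≤ k then
    pvInner k cs i (j + 1)
  else j
termination_by cs.length - j
decreasing_by omega

theorem pvInner_ge (k : Int) (cs : List Char) (i : Nat) (j : Nat) :
    j ≤ pvInner k cs i j := by
  induction j using pvInner.induct k cs i with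
  | case1 j h ih => rw [pvInner]; rw [dif_pos h]; omega
  | case2 j h => rw [pvInner]; rw [dif_neg h]

-- outer while loop over i with the count accumulator
def pvOuter (k : Int) (cs : List Char) (i : Nat) (count : Int) : Int :=
  if hi : i < cs.length then
    if k < pvDigit cs[i] then -1
    else
      pvOuter k cs (pvInner k cs i (i + 1)) (count + 1)
  else count
termination_by cs.length - i
decreasing_by
  have := pvInner_ge k cs i (i + 1)
  omega

def minimumPartition_alt (s : String) (k : Int) : Int :=
  pvOuter k s.toList 0 0

-- ===== PRECONDITION & SPEC =====
-- Pre_: exactly the inputs on which A returns: a nonempty string that either is all digits,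
-- or has a digit exceeding k preceded only by digits (then A's any() short-circuits to -1
-- before reaching any non-digit). Otherwise A raises IndexError ("") or ValueError (int of a non-digit).
def Pre_minimumPartition (s : String) (k : Int) : Prop :=
  s.toList ≠ [] ∧
    ((s.toList.all (fun c => decide ('0' ≤ c ∧ c ≤ '9'))) = true ∨
      ∃ j < s.toList.length,
        ((s.toList.take (j + 1)).all (fun c => decide ('0' ≤ c ∧ c ≤ '9'))) = true ∧
          k < pvDigit ((s.toList.drop j).headD '0'))
instance (s : String) (k : Int) : Decidable (Pre_minimumPartition s k) := by
  unfold Pre_minimumPartition; infer_instance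

def pvWitness_minimumPartition : String × Int := ("26", 7)

def Spec_minimumPartition (s : String) (k : Int) (out : Int) : Prop := out = minimumPartition_alt s k
instance (s : String) (k : Int) (out : Int) : Decidable (Spec_minimumPartition s k out) := by unfold Spec_minimumPartition; infer_instance

-- ===== CLAIM (what is proved, stated in full; the proofs are below) =====
def Claim_equal_minimumPartition : Prop := ∀ (s : String) (k : Int), Dom_minimumPartition s k → Pre_minimumPartition s k → Spec_minimumPartition s k (minimumPartition s k)

-- ===== LEMMAS AND PROOFS =====

-- value of the chunk s[i:j] (as B's re-parsing computes it)
def pvChunk (cs : List Char) (i j : Nat) : Int :=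
  pvStrVal ((cs.drop i).take (j - i))

theorem pvStrVal_append_singleton (xs : List Char) (c : Char) :
    pvStrVal (xs ++ [c]) = pvStrVal xs * 10 + pvDigit c := by
  simp [pvStrVal, List.foldl_append]

theorem pvChunk_succ (cs : List Char) (i j : Nat) (hij : i ≤ j) (hj : j < cs.length) :
    pvChunk cs i (j + 1) = pvChunk cs i j * 10 + pvDigit cs[j] := by
  have h1 : (cs.drop i).take (j + 1 - i) = (cs.drop i).take (j - i) ++ [cs[j]] := by
    have hlen : j - i < (cs.drop i).length := by simp [List.length_drop]; omega
    have : (cs.drop i)[j - i]'hlen = cs[j] := by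
      rw [List.getElem_drop]; congr 1; omega
    rw [← this]
    have : j + 1 - i = (j - i) + 1 := by omega
    rw [this, List.take_succ_eq_append_getElem hlen]
  simp [pvChunk, h1, pvStrVal_append_singleton]

theorem pvChunk_self (cs : List Char) (i : Nat) : pvChunk cs i i = 0 := by
  simp [pvChunk, pvStrVal]

theorem pvChunk_one (cs : List Char) (i : Nat) (hi : i < cs.length) :
    pvChunk cs i (i + 1) = pvDigit cs[i] := by
  rw [pvChunk_succ cs i i (le_refl i) hi, pvChunk_self]; ring

theorem pvChunk_nonneg (cs : List Char) (i j : Nat)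
    (hd : ∀ (t : Nat) (ht : t < cs.length), i ≤ t → t < j → 0 ≤ pvDigit (cs[t]'ht)) :
    0 ≤ pvChunk cs i j := by
  unfold pvChunk pvStrVal
  have key : ∀ (xs : List Char) (a : Int), (∀ c ∈ xs, 0 ≤ pvDigit c) → 0 ≤ a →
      0 ≤ xs.foldl (fun a c => a * 10 + pvDigit c) a := by
    intro xs
    induction xs with
    | nil => intro a _ ha; simpa using ha
    | cons c t ih =>
      intro a hall ha
      simp only [List.foldl_cons]
      exact ih _ (fun x hx => hall x (List.mem_cons_of_mem _ hx))
        (by have := hall c (List.mem_cons_self ..); nlinarith)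
  refine key _ 0 ?_ le_rfl
  intro c hc
  obtain ⟨t', ht', hct⟩ := List.getElem_of_mem hc
  have hb : t' < j - i ∧ t' < cs.length - i := by
    have := ht'
    simp only [List.length_take, List.length_drop] at this
    omega
  have hti : i + t' < cs.length := by omega
  have hel : ((cs.drop i).take (j - i))[t']'ht' = cs[i + t']'hti := by
    rw [List.getElem_take, List.getElem_drop]
  rw [← hct, hel]
  exact hd (i + t') hti (by omega) (by omega)

-- specification of the inner while loop
theorem pvInner_spec (k : Int) (cs : List Char) (i : Nat) (j : Nat) (hj : j ≤ cs.length) :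
    j ≤ pvInner k cs i j ∧ pvInner k cs i j ≤ cs.length ∧
    (∀ t, j ≤ t → t < pvInner k cs i j → pvChunk cs i (t + 1) ≤ k) ∧
    (pvInner k cs i j = cs.length ∨
      (pvInner k cs i j < cs.length ∧ k < pvChunk cs i (pvInner k cs i j + 1))) := by
  induction j using pvInner.induct k cs i with
  | case1 j h ih =>
    rw [pvInner]; rw [dif_pos h]
    obtain ⟨ge, le, mid, stop⟩ := ih (by omega)
    refine ⟨by omega, le, ?_, stop⟩
    intro t ht1 ht2
    by_cases htj : t = j
    · subst htj
      have : pvChunk cs i (t + 1) = pvStrVal ((cs.drop i).take (t + 1 - i)) := rfl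
      rw [this]; exact h.2
    · exact mid t (by omega) ht2
  | case2 j h =>
    rw [pvInner]; rw [dif_neg h]
    push_neg at h
    refine ⟨le_rfl, hj, by omega, ?_⟩
    rcases lt_or_ge j cs.length with hlt | hge
    · exact Or.inr ⟨hlt, h hlt⟩
    · exact Or.inl (by omega)

-- count-shift property of A's fold: the count component is additive
theorem pvFold_shift (k : Int) (cs : List Char) (a v : Int) :
    cs.foldl (pvStep k) (a, v) =
      (a + (cs.foldl (pvStep k) (0, v)).1, (cs.foldl (pvStep k) (0, v)).2) := by
  induction cs generalizing a v with
  | nil => simp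
  | cons c t ih =>
    simp only [List.foldl_cons, pvStep]
    by_cases h : v * 10 + pvDigit c ≤ k
    · simp only [h, if_true]
      exact ih a _
    · simp only [h, if_false]
      have h01 : (0 : Int) + 1 = 1 := by norm_num
      rw [h01, ih (a + 1) (pvDigit c), ih 1 (pvDigit c)]
      simp only [Prod.mk.injEq, and_true]
      omega

-- A's fold absorbs a whole run of in-chunk digits
theorem pvFold_consume (k : Int) (cs : List Char) (i : Nat) :
    ∀ (m j : Nat) (n : Int), i ≤ j → j + m ≤ cs.length →
      (∀ t, j ≤ t → t < j + m → pvChunk cs i (t + 1) ≤ k) →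
      (cs.drop j).foldl (pvStep k) (n, pvChunk cs i j) =
        (cs.drop (j + m)).foldl (pvStep k) (n, pvChunk cs i (j + m)) := by
  intro m
  induction m with
  | zero => intro j n _ _ _; rfl
  | succ m ih =>
    intro j n hij hlen hcond
    have hj : j < cs.length := by omega
    have hdj : cs.drop j = cs[j] :: cs.drop (j + 1) := by
      rw [List.drop_eq_getElem_cons hj]
    rw [hdj]
    simp only [List.foldl_cons, pvStep]
    have hc : pvChunk cs i j * 10 + pvDigit cs[j] = pvChunk cs i (j + 1) :=
      (pvChunk_succ cs i j hij hj).symm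
    rw [hc]
    have hle : pvChunk cs i (j + 1) ≤ k := hcond j le_rfl (by omega)
    simp only [hle, if_true]
    have hcond' : ∀ t, j + 1 ≤ t → t < j + 1 + m → pvChunk cs i (t + 1) ≤ k := by
      intro t ht1 ht2
      exact hcond t (by omega) (by omega)
    have heq : j + 1 + m = j + (m + 1) := by omega
    have hres := ih (j + 1) n (by omega) (by omega) hcond'
    rw [heq] at hres
    exact hres

-- positive case: no digit exceeds k; B's outer loop computes A's fold count
theorem pvOuter_pos (k : Int) (cs : List Char)
    (hd : ∀ c ∈ cs, 0 ≤ pvDigit c) (hk : ∀ c ∈ cs, pvDigit c ≤ k) :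
    ∀ (fuel i : Nat) (count : Int), cs.length - i ≤ fuel → ∀ (hi : i < cs.length),
      pvOuter k cs i count =
        count + ((cs.drop (i + 1)).foldl (pvStep k) (1, pvDigit (cs[i]'hi))).1 := by
  intro fuel
  induction fuel with
  | zero => intro i count h hi; omega
  | succ fuel ih =>
    intro i count hfuel hi
    rw [pvOuter]
    simp only [hi, dite_true]
    have hki : ¬ k < pvDigit cs[i] := not_lt.mpr (hk _ (List.getElem_mem hi))
    simp only [hki, if_false]
    set e := pvInner k cs i (i + 1) with he
    obtain ⟨hge, hle, hmid, hstop⟩ := pvInner_spec k cs i (i + 1) (by omega)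
    have hfold : (cs.drop (i + 1)).foldl (pvStep k) (1, pvDigit cs[i]) =
        (cs.drop e).foldl (pvStep k) (1, pvChunk cs i e) := by
      have h1 : pvChunk cs i (i + 1) = pvDigit cs[i] := pvChunk_one cs i hi
      have hcons := pvFold_consume k cs i (e - (i + 1)) (i + 1) 1 (by omega) (by omega)
        (fun t ht1 ht2 => hmid t ht1 (by omega))
      have hidx : i + 1 + (e - (i + 1)) = e := by omega
      rw [hidx] at hcons
      rw [← h1]
      exact hcons
    rcases hstop with heq | ⟨hlt, hgt⟩
    · -- chunk runs to the end of the string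
      have houter : pvOuter k cs e (count + 1) = count + 1 := by
        rw [pvOuter, dif_neg (by omega : ¬ e < cs.length)]
      rw [houter, hfold]
      have hnil : cs.drop e = ([] : List Char) := List.drop_eq_nil_of_le (by omega)
      rw [hnil]
      simp
    · -- a new chunk starts at e
      have hde : cs.drop e = cs[e] :: cs.drop (e + 1) := by
        rw [List.drop_eq_getElem_cons hlt]
      have hstep : pvStep k (1, pvChunk cs i e) cs[e] = (2, pvDigit cs[e]) := by
        unfold pvStep
        have : pvChunk cs i e * 10 + pvDigit cs[e] = pvChunk cs i (e + 1) :=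
          (pvChunk_succ cs i e (by omega) hlt).symm
        rw [this, if_neg (show ¬ pvChunk cs i (e + 1) ≤ k by rw [he]; omega)]
        norm_num
      have ihe := ih e (count + 1) (by omega) hlt
      rw [ihe, hfold, hde]
      simp only [List.foldl_cons, hstep]
      rw [pvFold_shift k _ 2 (pvDigit cs[e]), pvFold_shift k _ 1 (pvDigit cs[e])]
      ring

-- negative case: a digit at position j exceeds k and is preceded only by digits;
-- B's maximal munch can never extend a partition past j, so it reaches j and returns -1
theorem pvOuter_neg (k : Int) (cs : List Char) (j : Nat) (hj : j < cs.length)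
    (hdpref : ∀ (t : Nat) (ht : t < cs.length), t ≤ j → 0 ≤ pvDigit (cs[t]'ht))
    (hbad : k < pvDigit (cs[j]'hj)) :
    ∀ (fuel i : Nat) (count : Int), cs.length - i ≤ fuel → i ≤ j →
      pvOuter k cs i count = -1 := by
  intro fuel
  induction fuel with
  | zero => intro i count hfuel hij; omega
  | succ fuel ih =>
    intro i count hfuel hij
    have hi : i < cs.length := by omega
    rw [pvOuter, dif_pos hi]
    by_cases hki : k < pvDigit cs[i]
    · rw [if_pos hki]
    · rw [if_neg hki]
      have hbad2 : k < pvDigit cs[j] := hbad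
      have hij' : i < j := by
        rcases Nat.lt_or_ge i j with h | h
        · exact h
        · have hieq : i = j := by omega
          subst hieq
          exact absurd hbad2 hki
      set e := pvInner k cs i (i + 1) with he
      obtain ⟨hge, hle, hmid, hstop⟩ := pvInner_spec k cs i (i + 1) (by omega)
      have hej : e ≤ j := by
        by_contra hejn
        push_neg at hejn
        have h1 : pvChunk cs i (j + 1) ≤ k := hmid j (by omega) (by omega)
        have h2 : pvChunk cs i (j + 1) = pvChunk cs i j * 10 + pvDigit cs[j] :=
          pvChunk_succ cs i j (by omega) hj
        have h3 : 0 ≤ pvChunk cs i j :=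
          pvChunk_nonneg cs i j (fun t ht _ htb => hdpref t ht (by omega))
        have h4 : 0 ≤ pvChunk cs i j * 10 :=
          mul_nonneg h3 (by norm_num)
        linarith
      exact ih e (count + 1) (by omega) hej

-- ===== VERDICT (by name: the statement is the Claim_ definition above) =====
theorem minimumPartition_spec : Claim_equal_minimumPartition := by
  intro s k _ hpre
  obtain ⟨hne, hcase⟩ := hpre
  unfold Spec_minimumPartition minimumPartition minimumPartition_alt
  by_cases hall : (s.toList.all (fun c => decide ('0' ≤ c ∧ c ≤ '9'))) = true
  · -- the whole string is digits
    have hdig : ∀ c ∈ s.toList, '0' ≤ c ∧ c ≤ '9' := by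
      intro c hc
      simpa using List.all_eq_true.mp hall c hc
    have hd : ∀ c ∈ s.toList, 0 ≤ pvDigit c := by
      intro c hc
      have := (hdig c hc).1
      simp only [pvDigit]
      have : 48 ≤ c.toNat := this
      omega
    by_cases hany : s.toList.any (fun c => k < pvDigit c)
    · -- A returns -1; B's scan hits a partition-start digit > k
      simp only [hany, if_true]
      obtain ⟨c, hc, hck⟩ := List.any_eq_true.mp hany
      obtain ⟨j, hj, hcj⟩ := List.getElem_of_mem hc
      refine (pvOuter_neg k s.toList j hj
        (fun t ht _ => hd _ (List.getElem_mem ht))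
        (by rw [hcj]; simpa using hck)
        s.toList.length 0 0 (by omega) (by omega)).symm
    · -- all digits ≤ k: both count greedy maximal partitions
      simp only [hany, if_false]
      have hk : ∀ c ∈ s.toList, pvDigit c ≤ k := by
        intro c hc
        by_contra hgt
        exact hany (List.any_eq_true.mpr ⟨c, hc, by simpa using not_le.mp hgt⟩)
      match hcs : s.toList with
      | [] => exact absurd hcs hne
      | c :: rest =>
        rw [hcs] at hd hk
        have h0 : 0 < (c :: rest).length := by simp
        have := pvOuter_pos k (c :: rest) hd hk (c :: rest).length 0 0 (by omega) h0
        rw [this]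
        simp
  · -- a digit > k preceded only by digits: both return -1
    obtain ⟨j, hj, hpref, hbad⟩ := hcase.resolve_left hall
    have hdj : (s.toList.drop j).headD '0' = s.toList[j]'hj := by
      rw [List.drop_eq_getElem_cons hj]
      rfl
    rw [hdj] at hbad
    have hdpref : ∀ (t : Nat) (ht : t < s.toList.length), t ≤ j →
        0 ≤ pvDigit (s.toList[t]'ht) := by
      intro t ht htj
      have htk : t < (s.toList.take (j + 1)).length := by
        simp only [List.length_take]
        omega
      have hel : (s.toList.take (j + 1))[t]'htk = s.toList[t]'ht := List.getElem_take ..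
      have hmem : s.toList[t]'ht ∈ s.toList.take (j + 1) := by
        rw [← hel]
        exact List.getElem_mem htk
      have hc9 := List.all_eq_true.mp hpref _ hmem
      simp only [decide_eq_true_eq] at hc9
      have h48 : 48 ≤ (s.toList[t]'ht).toNat := hc9.1
      simp only [pvDigit]
      omega
    have hany : s.toList.any (fun c => k < pvDigit c) = true :=
      List.any_eq_true.mpr ⟨s.toList[j]'hj, List.getElem_mem hj, by simpa using hbad⟩
    simp only [hany, if_true]
    exact (pvOuter_neg k s.toList j hj hdpref hbad
      s.toList.length 0 0 (by omega) (by omega)).symm
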